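-- pv_equiv track=rewrite | github.com/ChecksumDev/wysibotpy | src/utilities/tools.py | extract_socials
-- ===== SOURCE A (Python) =====
-- def extract_socials(json_obj):
--     twitter_link = None
--     twitch_link = None
--     youtube_link = None
--     beatsaver_link = None
--     for item in json_obj:
--         service = item.get('service')
--         link = item.get('link')
--
--         if service and link:
--             if service == 'Twitter':
--                 twitter_link = link
--             elif service == 'Twitch':
--                 twitch_link = link
--             elif service == 'YouTube':
--                 youtube_link = link
--             elif service == 'BeatSaver':
--                 beatsaver_link = link
--
--     return twitter_link, twitch_link, youtube_link, beatsaver_link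
-- ===== SOURCE B (Python) =====
-- def extract_socials(json_obj):
--     def latest(service):
--         # backward first-match = forward last-wins
--         for item in reversed(json_obj):
--             if item.get('service') == service and item.get('link'):
--                 return item['link']
--         return None
--     return (latest('Twitter'), latest('Twitch'),
--             latest('YouTube'), latest('BeatSaver'))
-- ===== Notes on version B (the rewrite author's own statement) =====
-- stated objective: alternative
-- what changed: Replaces the single forward fold with four accumulator variables and an if/elif dispatch by four independent backward first-match searches (reversed scan per service), whose early return realises A's last-wins overwrite semantics.
import Mathlib
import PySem

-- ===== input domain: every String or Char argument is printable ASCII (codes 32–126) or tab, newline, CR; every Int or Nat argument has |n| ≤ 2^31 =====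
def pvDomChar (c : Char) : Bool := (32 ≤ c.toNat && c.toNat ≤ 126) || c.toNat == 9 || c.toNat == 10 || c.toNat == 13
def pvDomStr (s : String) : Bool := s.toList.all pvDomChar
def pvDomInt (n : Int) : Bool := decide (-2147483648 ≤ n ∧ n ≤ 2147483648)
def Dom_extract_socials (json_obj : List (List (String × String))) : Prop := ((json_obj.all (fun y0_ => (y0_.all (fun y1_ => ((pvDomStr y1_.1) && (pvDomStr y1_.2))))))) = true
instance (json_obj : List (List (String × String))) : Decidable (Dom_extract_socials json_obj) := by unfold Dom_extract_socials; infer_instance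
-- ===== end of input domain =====

-- B replaces A's single forward fold (four accumulators + if/elif dispatch) by four
-- independent backward first-match searches over reversed(json_obj) ('alternative').


-- ===== PORT A =====
-- Python truthiness of an Optional[str]
def pvTruthy : Option String → Bool
  | none => false
  | some s => !(s == "")

-- one iteration of A's for-loop over the 4-tuple of accumulators
def pvStepA (st : Option String × Option String × Option String × Option String)
    (item : List (String × String)) :
    Option String × Option String × Option String × Option String :=
  let service := (PySem.Dict.mk item).get? "service"
  let link := (PySem.Dict.mk item).get? "link"
  if pvTruthy service && pvTruthy link then
    if service == some "Twitter" then (link, st.2.1, st.2.2.1, st.2.2.2)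
    else if service == some "Twitch" then (st.1, link, st.2.2.1, st.2.2.2)
    else if service == some "YouTube" then (st.1, st.2.1, link, st.2.2.2)
    else if service == some "BeatSaver" then (st.1, st.2.1, st.2.2.1, link)
    else st
  else st

def extract_socials (json_obj : List (List (String × String))) : Option String × Option String × Option String × Option String :=
  json_obj.foldl pvStepA (none, none, none, none)

-- ===== PORT B =====
-- B's inner 'latest': scan the (already reversed) list, return the first item whose
-- service equals the target and whose link is truthy; None if none matches.
def pvLatest (s : String) : List (List (String × String)) → Option String
  | [] => none
  | item :: rest =>
      if (PySem.Dict.mk item).get? "service" == some s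
          && pvTruthy ((PySem.Dict.mk item).get? "link") then
        (PySem.Dict.mk item).get? "link"   -- item['link'] (guard ensures present)
      else pvLatest s rest

def extract_socials_alt (json_obj : List (List (String × String))) : Option String × Option String × Option String × Option String :=
  let r := json_obj.reverse
  (pvLatest "Twitter" r, pvLatest "Twitch" r, pvLatest "YouTube" r, pvLatest "BeatSaver" r)

-- ===== PRECONDITION & SPEC =====
def Spec_extract_socials (json_obj : List (List (String × String))) (out : Option String × Option String × Option String × Option String) : Prop := out = extract_socials_alt json_obj
instance (json_obj : List (List (String × String))) (out : Option String × Option String × Option String × Option String) : Decidable (Spec_extract_socials json_obj out) := by unfold Spec_extract_socials; infer_instance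

-- ===== CLAIM =====
def Claim_equal_extract_socials : Prop := ∀ (json_obj : List (List (String × String))), Dom_extract_socials json_obj → Spec_extract_socials json_obj (extract_socials json_obj)

-- ===== LEMMAS AND PROOFS =====
-- 'first match wins' combinator used to state the loop invariant
def pvOr (o d : Option String) : Option String :=
  match o with
  | some v => some v
  | none => d

lemma pvLatest_append (s : String) (xs ys : List (List (String × String))) :
    pvLatest s (xs ++ ys) = pvOr (pvLatest s xs) (pvLatest s ys) := by
  induction xs with
  | nil => simp [pvLatest, pvOr]
  | cons item rest ih =>
    simp only [List.cons_append, pvLatest]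
    split
    · rename_i h
      cases hl : (PySem.Dict.mk item).get? "link" with
      | none => rw [hl] at h; simp [pvTruthy] at h
      | some v => simp [pvOr]
    · exact ih

lemma pvOr_assoc (a b c : Option String) : pvOr (pvOr a b) c = pvOr a (pvOr b c) := by
  cases a <;> simp [pvOr]

lemma pvOr_none (a : Option String) : pvOr a none = a := by
  cases a <;> simp [pvOr]

-- one step of A updates each slot exactly like a one-element backward search would
lemma pv_step (item : List (String × String))
    (st : Option String × Option String × Option String × Option String) :
    pvStepA st item =
      (pvOr (pvLatest "Twitter" [item]) st.1, pvOr (pvLatest "Twitch" [item]) st.2.1,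
       pvOr (pvLatest "YouTube" [item]) st.2.2.1, pvOr (pvLatest "BeatSaver" [item]) st.2.2.2) := by
  simp only [pvStepA, pvLatest, pvTruthy]
  cases hs : (PySem.Dict.mk item).get? "service" with
  | none => simp [pvOr]
  | some sv =>
    cases hl : (PySem.Dict.mk item).get? "link" with
    | none => simp [pvOr]
    | some lnk =>
      by_cases hle : lnk = ""
      · simp [hle, pvOr]
      · by_cases e1 : sv = "Twitter"
        · simp [e1, hle, pvOr]
        · by_cases e2 : sv = "Twitch"
          · simp [e2, hle, pvOr]
          · by_cases e3 : sv = "YouTube"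
            · simp [e3, hle, pvOr]
            · by_cases e4 : sv = "BeatSaver"
              · simp [e4, hle, pvOr]
              · by_cases hse : sv = ""
                · simp [hse, pvOr]
                · simp [hse, hle, e1, e2, e3, e4, pvOr]

-- loop invariant: the fold equals the backward searches, merged with the start state
lemma pv_loop (l : List (List (String × String)))
    (st : Option String × Option String × Option String × Option String) :
    l.foldl pvStepA st =
      (pvOr (pvLatest "Twitter" l.reverse) st.1,
       pvOr (pvLatest "Twitch" l.reverse) st.2.1,
       pvOr (pvLatest "YouTube" l.reverse) st.2.2.1,
       pvOr (pvLatest "BeatSaver" l.reverse) st.2.2.2) := by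
  induction l generalizing st with
  | nil => simp [pvLatest, pvOr]
  | cons item rest ih =>
    simp only [List.foldl_cons, List.reverse_cons]
    rw [ih (pvStepA st item), pv_step]
    simp only [pvLatest_append, pvOr_assoc]

-- ===== VERDICT =====
theorem extract_socials_spec : Claim_equal_extract_socials := by
  intro json_obj _
  unfold Spec_extract_socials extract_socials extract_socials_alt
  rw [pv_loop]
  simp only [pvOr_none]
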